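-- pv_equiv track=rewrite | github.com/SungjunCho/PCAP-AIDE | protocol_rule_engine.py | _normalize_variants
-- ===== SOURCE A (Python) =====
-- _HOMOGLYPH_EXPAND = {
--     # 각 숫자/문자가 어떤 알파벳을 대체할 수 있는지 (다중 가능)
--     '0': ['o'],
--     '1': ['l', 'i'],   # 1은 l과 i 모두 대체 가능 (netfl1x → netfix/netflx)
--     '3': ['e'],
--     '4': ['a'],
--     '5': ['s'],
--     '6': ['b'],
--     '8': ['b'],
--     '@': ['a'],
-- }
--
-- def _normalize_variants(s: str):
--     """
--     문자열의 동형자(homoglyph) 변형을 정규화한 후보 집합을 반환한다.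
--     예: 'netfl1x' → {'netflx', 'netflix', 'netfllx'}
--     """
--     s = s.lower()
--     # rn → m, vv → w (문자열 수준 치환)
--     s = s.replace('rn', 'm').replace('vv', 'w')
--     # 대문자 I가 l처럼 보이는 경우 → 이미 .lower()로 i가 됨
--     # i ↔ l 쌍방향: 소문자 i를 l로도 읽을 수 있음
--     variants = {s}
--     # 1 → l or i 변형
--     for ch, replacements in _HOMOGLYPH_EXPAND.items():
--         new_variants = set()
--         for v in variants:
--             if ch in v:
--                 for r in replacements:
--                     new_variants.add(v.replace(ch, r))
--         variants |= new_variants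
--     # i ↔ l 쌍방향 추가
--     more = set()
--     for v in variants:
--         more.add(v.replace('i', 'l'))
--         more.add(v.replace('l', 'i'))
--     variants |= more
--     return variants
-- ===== SOURCE B (Python) =====
-- _HOMOGLYPH_EXPAND = {
--     '0': ['o'],
--     '1': ['l', 'i'],
--     '3': ['e'],
--     '4': ['a'],
--     '5': ['s'],
--     '6': ['b'],
--     '8': ['b'],
--     '@': ['a'],
-- }
--
-- def _normalize_variants(s: str):
--     s = s.lower().replace('rn', 'm').replace('vv', 'w')
--     # Enumerate substitution mappings: each homoglyph key present in s is
--     # either kept or mapped (all occurrences) to one of its candidate letters.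
--     mappings = [{}]
--     for ch, replacements in _HOMOGLYPH_EXPAND.items():
--         if ch in s:
--             mappings += [{**m, ch: r} for m in mappings for r in replacements]
--     # Apply each mapping in a single pass over s.
--     variants = {''.join(m.get(c, c) for c in s) for m in mappings}
--     # i <-> l bidirectional pass over the whole variant set.
--     more = set()
--     for v in variants:
--         more.add(v.replace('i', 'l'))
--         more.add(v.replace('l', 'i'))
--     return variants | more
-- ===== Notes on version B (the rewrite author's own statement) =====
-- stated objective: alternative
-- what changed: Instead of growing a set of variant strings by repeated str.replace with per-variant membership tests, B enumerates the substitution mappings (each present homoglyph key kept or mapped to one candidate) and applies each mapping to the normalized string in a single character-wise pass, then does the same final i<->l pass.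
import Mathlib
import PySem

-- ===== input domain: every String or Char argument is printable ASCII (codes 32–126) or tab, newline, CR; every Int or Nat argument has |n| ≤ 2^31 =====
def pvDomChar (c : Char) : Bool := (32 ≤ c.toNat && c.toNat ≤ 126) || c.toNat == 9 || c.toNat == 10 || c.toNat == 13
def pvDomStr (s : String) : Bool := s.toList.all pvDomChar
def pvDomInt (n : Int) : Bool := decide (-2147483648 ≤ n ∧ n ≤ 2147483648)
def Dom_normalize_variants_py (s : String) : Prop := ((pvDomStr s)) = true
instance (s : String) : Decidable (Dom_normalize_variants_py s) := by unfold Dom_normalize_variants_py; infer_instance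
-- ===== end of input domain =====

-- B enumerates substitution mappings and applies each in one pass instead of growing a
-- set of strings by repeated replace (objective: alternative decomposition, same cost).

-- the module constant _HOMOGLYPH_EXPAND (a dict literal), as its items() list
def hgExpand : List (Char × List Char) :=
  [('0', ['o']), ('1', ['l', 'i']), ('3', ['e']), ('4', ['a']), ('5', ['s']),
   ('6', ['b']), ('8', ['b']), ('@', ['a'])]

-- ===== PORT A =====
def normalize_variants_py (s : String) : List String :=
  let s2 := PySem.Str.replace (PySem.Str.replace (PySem.Str.lower s) "rn" "m") "vv" "w"
  let variants : PySem.Set String := PySem.Set.ofList [s2]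
  let variants := hgExpand.foldl (fun variants p =>
      PySem.Set.union variants
        (variants.foldl (fun nv v =>
            if PySem.Str.isIn (String.ofList [p.1]) v then
              p.2.foldl (fun nv r =>
                  PySem.Set.add nv
                    (PySem.Str.replace v (String.ofList [p.1]) (String.ofList [r]))) nv
            else nv)
          PySem.Set.empty)) variants
  PySem.Set.union variants
    (variants.foldl (fun more v =>
        PySem.Set.add (PySem.Set.add more (PySem.Str.replace v "i" "l"))
          (PySem.Str.replace v "l" "i"))
      PySem.Set.empty)

-- ===== PORT B =====
-- ''.join(m.get(c, c) for c in s): apply one substitution mapping in a single pass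
def hgApply (m : PySem.Dict Char Char) (s : String) : String :=
  String.ofList (s.toList.map (fun c => m.getD c c))

def normalize_variants_py_alt (s : String) : List String :=
  let s2 := PySem.Str.replace (PySem.Str.replace (PySem.Str.lower s) "rn" "m") "vv" "w"
  let mappings : List (PySem.Dict Char Char) := hgExpand.foldl (fun ms p =>
      if PySem.Str.isIn (String.ofList [p.1]) s2 then
        ms ++ ms.flatMap (fun m => p.2.map (fun r => m.insert p.1 r))
      else ms) [PySem.Dict.empty]
  let variants : PySem.Set String := PySem.Set.ofList (mappings.map (fun m => hgApply m s2))
  PySem.Set.union variants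
    (variants.foldl (fun more v =>
        PySem.Set.add (PySem.Set.add more (PySem.Str.replace v "i" "l"))
          (PySem.Str.replace v "l" "i"))
      PySem.Set.empty)

-- ===== PRECONDITION & SPEC =====
def Spec_normalize_variants_py (s : String) (out : List String) : Prop := out = normalize_variants_py_alt s
instance (s : String) (out : List String) : Decidable (Spec_normalize_variants_py s out) := by unfold Spec_normalize_variants_py; infer_instance

-- ===== CLAIM (what is proved, stated in full; the proofs are below) =====
def Claim_equal_normalize_variants_py : Prop := ∀ (s : String), Dom_normalize_variants_py s → Spec_normalize_variants_py s (normalize_variants_py s)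

-- ===== LEMMAS AND PROOFS =====

-- Python str.replace with single-character old/new is a character map
theorem replace_single (a b : Char) (l : List Char) :
    PySem.Chars.replace l [a] [b] = l.map (fun c => if c = a then b else c) := by
  have go : ∀ (fuel : Nat) (l acc : List Char), l.length ≤ fuel →
      PySem.Chars.replace.go [a] [b] fuel l acc
        = acc.reverse ++ l.map (fun c => if c = a then b else c) := by
    intro fuel
    induction fuel with
    | zero =>
      intro l acc h
      have : l = [] := List.eq_nil_of_length_eq_zero (Nat.le_zero.mp h)
      subst this
      simp [PySem.Chars.replace.go]
    | succ n ih =>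
      intro l acc h
      cases l with
      | nil => simp [PySem.Chars.replace.go]
      | cons c t =>
        by_cases hc : c = a
        · subst hc
          have hpre : List.isPrefixOf [c] (c :: t) = true := by
            simp [List.isPrefixOf]
          simp only [PySem.Chars.replace.go, hpre, if_true, List.length_cons,
            List.length_nil, List.drop_succ_cons, List.drop_zero]
          rw [ih t ([b].reverse ++ acc) (by simpa using Nat.le_of_succ_le_succ h)]
          simp
        · have hpre : List.isPrefixOf [a] (c :: t) = false := by
            simp [List.isPrefixOf]
            exact fun hy => absurd hy.symm hc
          simp only [PySem.Chars.replace.go, hpre]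
          rw [ih t (c :: acc) (Nat.le_of_succ_le_succ h)]
          simp [hc]
  rw [PySem.Chars.replace]
  simp only [List.isEmpty_cons]
  exact go l.length l [] le_rfl

theorem isin_single (a : Char) (v : String) :
    PySem.Str.isIn (String.ofList [a]) v = true ↔ a ∈ v.toList := by
  rw [PySem.Str.isIn_iff_infix]
  simp [List.singleton_infix_iff]

-- invariant: every binding of a mapping was created from an already-processed key,
-- and its value is never a homoglyph key character
def DInv (procd : List Char) (m : PySem.Dict Char Char) : Prop :=
  ∀ k v, m.get? k = some v → k ∈ procd ∧ v ∉ hgExpand.map Prod.fst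

theorem getD_key (procd : List Char) (m : PySem.Dict Char Char) (hm : DInv procd m)
    (ch : Char) (hch : ch ∉ procd) (hK : ch ∈ hgExpand.map Prod.fst) (c : Char) :
    m.getD c c = ch ↔ c = ch := by
  constructor
  · intro h
    by_cases hc : c = ch
    · exact hc
    · cases hg : m.get? c with
      | none => simp [PySem.Dict.getD, hg] at h; exact absurd h hc
      | some v =>
        have hv := hm c v hg
        simp [PySem.Dict.getD, hg] at h
        subst h
        exact absurd hK hv.2
  · intro h
    subst h
    cases hg : m.get? c with
    | none => simp [PySem.Dict.getD, hg]
    | some v => exact absurd (hm c v hg).1 hch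

-- occurrence of an unprocessed key character is preserved by hgApply
theorem mem_apply (procd : List Char) (m : PySem.Dict Char Char) (hm : DInv procd m)
    (ch : Char) (hch : ch ∉ procd) (hK : ch ∈ hgExpand.map Prod.fst) (cs : List Char) :
    ch ∈ cs.map (fun c => m.getD c c) ↔ ch ∈ cs := by
  rw [List.mem_map]
  constructor
  · rintro ⟨c, hc, he⟩
    rwa [(getD_key procd m hm ch hch hK c).mp he] at hc
  · intro h
    exact ⟨ch, h, (getD_key procd m hm ch hch hK ch).mpr rfl⟩

-- replacing an unprocessed key on an applied string = applying the extended mapping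
theorem replace_apply (procd : List Char) (m : PySem.Dict Char Char) (hm : DInv procd m)
    (ch : Char) (hch : ch ∉ procd) (hK : ch ∈ hgExpand.map Prod.fst) (r : Char) (s2 : String) :
    PySem.Str.replace (hgApply m s2) (String.ofList [ch]) (String.ofList [r])
      = hgApply (m.insert ch r) s2 := by
  apply String.toList_inj.mp
  rw [PySem.Str.toList_replace]
  simp only [hgApply, String.toList_ofList]
  rw [replace_single, List.map_map]
  apply List.map_congr_left
  intro c _
  simp only [Function.comp]
  by_cases hc : c = ch
  · subst hc
    rw [(getD_key procd m hm c hch hK c).mpr rfl]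
    simp
  · have hx : m.getD c c ≠ ch := fun h => hc ((getD_key procd m hm ch hch hK c).mp h)
    rw [if_neg hx, PySem.Dict.getD_insert, if_neg hc]

theorem dinv_mono (procd : List Char) (ch : Char) (m : PySem.Dict Char Char)
    (hm : DInv procd m) : DInv (procd ++ [ch]) m := by
  intro k v hkv
  exact ⟨List.mem_append_left _ (hm k v hkv).1, (hm k v hkv).2⟩

theorem dinv_insert (procd : List Char) (m : PySem.Dict Char Char) (hm : DInv procd m)
    (ch r : Char) (hr : r ∉ hgExpand.map Prod.fst) :
    DInv (procd ++ [ch]) (m.insert ch r) := by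
  intro k v hkv
  rw [PySem.Dict.get?_insert] at hkv
  by_cases hk : k = ch
  · rw [if_pos hk] at hkv
    cases hkv
    exact ⟨by simp [hk], hr⟩
  · rw [if_neg hk] at hkv
    exact ⟨List.mem_append_left _ (hm k v hkv).1, (hm k v hkv).2⟩

-- set-algebra helpers
theorem foldl_update_flatMap {α β : Type} [BEq α] (L : List β) (f : β → List α)
    (s0 : PySem.Set α) :
    L.foldl (fun s v => PySem.Set.update s (f v)) s0 = PySem.Set.update s0 (L.flatMap f) := by
  induction L generalizing s0 with
  | nil => simp [PySem.Set.update_nil]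
  | cons x xs ih => rw [List.foldl_cons, List.flatMap_cons, PySem.Set.update_append, ih]

theorem update_of_subset {α : Type} [BEq α] [LawfulBEq α] (t : PySem.Set α) (ys : List α)
    (h : ∀ y ∈ ys, y ∈ t) : PySem.Set.update t ys = t := by
  induction ys with
  | nil => exact PySem.Set.update_nil t
  | cons y ys ih =>
    rw [PySem.Set.update_cons, PySem.Set.add_of_mem (h y List.mem_cons_self)]
    exact ih fun z hz => h z (List.mem_cons_of_mem _ hz)

theorem update_ofList_right {α : Type} [BEq α] [LawfulBEq α] (s : PySem.Set α) (L : List α) :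
    PySem.Set.update s (PySem.Set.ofList L) = PySem.Set.update s L := by
  rw [PySem.Set.update_eq_append_filter, PySem.Set.ofList_ofList,
    ← PySem.Set.update_eq_append_filter]

theorem update_flatMap_ofList {β : Type} [BEq β] [LawfulBEq β] (s : PySem.Set β)
    (L : List β) (f : β → List β) :
    PySem.Set.update s ((PySem.Set.ofList L).flatMap f) = PySem.Set.update s (L.flatMap f) := by
  induction L using List.reverseRecOn with
  | nil => rfl
  | append_singleton L x ih =>
    rw [PySem.Set.ofList_append_singleton, List.flatMap_append, PySem.Set.update_append]
    by_cases hx : x ∈ L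
    · rw [PySem.Set.add_of_mem ((PySem.Set.mem_ofList L x).mpr hx), ih]
      refine (update_of_subset _ _ ?_).symm
      intro y hy
      simp only [List.flatMap_singleton] at hy
      exact (PySem.Set.mem_update s (L.flatMap f) y).mpr
        (Or.inr (List.mem_flatMap.mpr ⟨x, hx, hy⟩))
    · rw [PySem.Set.add_of_not_mem (fun hc => hx ((PySem.Set.mem_ofList L x).mp hc)),
        List.flatMap_append, PySem.Set.update_append, ih]

theorem hgApply_empty (s : String) : hgApply PySem.Dict.empty s = s := by
  unfold hgApply
  simp [PySem.Dict.getD_empty]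

-- the phase-1 loop invariant: A's variant set is B's mapping list, applied
theorem phase1 (s2 : String) (rest : List (Char × List Char)) (procd : List Char)
    (M : List (PySem.Dict Char Char))
    (hdisj : ∀ p ∈ rest, p.1 ∉ procd)
    (hGV : ∀ p ∈ rest, ∀ r ∈ p.2, r ∉ hgExpand.map Prod.fst)
    (hKmem : ∀ p ∈ rest, p.1 ∈ hgExpand.map Prod.fst)
    (hnd : (rest.map Prod.fst).Nodup)
    (hM : ∀ m ∈ M, DInv procd m) :
    rest.foldl (fun variants p =>
        PySem.Set.union variants
          (variants.foldl (fun nv v =>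
              if PySem.Str.isIn (String.ofList [p.1]) v then
                p.2.foldl (fun nv r =>
                    PySem.Set.add nv
                      (PySem.Str.replace v (String.ofList [p.1]) (String.ofList [r]))) nv
              else nv)
            PySem.Set.empty))
      (PySem.Set.ofList (M.map (fun m => hgApply m s2)))
    = PySem.Set.ofList
        ((rest.foldl (fun ms p =>
            if PySem.Str.isIn (String.ofList [p.1]) s2 then
              ms ++ ms.flatMap (fun m => p.2.map (fun r => m.insert p.1 r))
            else ms) M).map (fun m => hgApply m s2)) := by
  induction rest generalizing procd M with
  | nil => rfl
  | cons p rest' ih =>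
    obtain ⟨ch, reps⟩ := p
    have hchp : ch ∉ procd := hdisj (ch, reps) List.mem_cons_self
    have hKch : ch ∈ hgExpand.map Prod.fst := hKmem (ch, reps) List.mem_cons_self
    have hndtail : ch ∉ rest'.map Prod.fst ∧ (rest'.map Prod.fst).Nodup := by
      simpa using hnd
    simp only [List.foldl_cons]
    by_cases hch : ch ∈ s2.toList
    · -- the key character occurs in s2, hence in every variant
      have hcond : PySem.Str.isIn (String.ofList [ch]) s2 = true := (isin_single ch s2).mpr hch
      rw [if_pos hcond]
      have hcongr : (PySem.Set.ofList (M.map (fun m => hgApply m s2))).foldl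
            (fun nv v =>
              if PySem.Str.isIn (String.ofList [ch]) v then
                reps.foldl (fun nv r =>
                    PySem.Set.add nv
                      (PySem.Str.replace v (String.ofList [ch]) (String.ofList [r]))) nv
              else nv)
            PySem.Set.empty
          = (PySem.Set.ofList (M.map (fun m => hgApply m s2))).foldl
            (fun nv v => PySem.Set.update nv
              (reps.map (fun r =>
                PySem.Str.replace v (String.ofList [ch]) (String.ofList [r]))))
            PySem.Set.empty := by
        apply PySem.List.foldl_congr_mem
        intro acc v hv
        obtain ⟨m, hm, rfl⟩ := List.mem_map.mp ((PySem.Set.mem_ofList _ _).mp hv)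
        have hin : ch ∈ (hgApply m s2).toList := by
          simp only [hgApply, String.toList_ofList]
          exact (mem_apply procd m (hM m hm) ch hchp hKch s2.toList).mpr hch
        rw [if_pos ((isin_single ch (hgApply m s2)).mpr hin),
          PySem.Set.update_map_eq_foldl_add]
      rw [hcongr,
        foldl_update_flatMap (PySem.Set.ofList (M.map (fun m => hgApply m s2)))
          (fun v => reps.map (fun r =>
            PySem.Str.replace v (String.ofList [ch]) (String.ofList [r])))
          PySem.Set.empty,
        PySem.Set.update_empty]
      have hunion : ∀ (V : PySem.Set String) (X : List String),
          PySem.Set.union V (PySem.Set.ofList X) = PySem.Set.update V X := by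
        intro V X
        show PySem.Set.update V (PySem.Set.ofList X) = PySem.Set.update V X
        exact update_ofList_right V X
      rw [hunion,
        update_flatMap_ofList (PySem.Set.ofList (M.map (fun m => hgApply m s2)))
          (M.map (fun m => hgApply m s2))
          (fun v => reps.map (fun r =>
            PySem.Str.replace v (String.ofList [ch]) (String.ofList [r])))]
      have htail : (M.map (fun m => hgApply m s2)).flatMap
            (fun v => reps.map (fun r =>
              PySem.Str.replace v (String.ofList [ch]) (String.ofList [r])))
          = (M.flatMap (fun m => reps.map (fun r => m.insert ch r))).map
              (fun m => hgApply m s2) := by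
        rw [List.map_flatMap, List.flatMap_map]
        apply List.flatMap_congr
        intro m hm
        rw [List.map_map]
        apply List.map_congr_left
        intro r _
        exact replace_apply procd m (hM m hm) ch hchp hKch r s2
      rw [htail, ← PySem.Set.ofList_append, ← List.map_append]
      exact ih (procd ++ [ch]) (M ++ M.flatMap (fun m => reps.map (fun r => m.insert ch r)))
        (fun q hq => by
          intro hc
          rcases List.mem_append.mp hc with h1 | h2
          · exact hdisj q (List.mem_cons_of_mem _ hq) h1
          · simp only [List.mem_singleton] at h2
            exact hndtail.1 (h2 ▸ List.mem_map_of_mem hq))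
        (fun q hq => hGV q (List.mem_cons_of_mem _ hq))
        (fun q hq => hKmem q (List.mem_cons_of_mem _ hq))
        hndtail.2
        (fun m' hm' => by
          rcases List.mem_append.mp hm' with h1 | h2
          · exact dinv_mono procd ch m' (hM m' h1)
          · obtain ⟨m, hm, hmem⟩ := List.mem_flatMap.mp h2
            obtain ⟨r, hr, rfl⟩ := List.mem_map.mp hmem
            exact dinv_insert procd m (hM m hm) ch r
              (hGV (ch, reps) List.mem_cons_self r hr))
    · -- the key character does not occur: both loops leave their state unchanged
      have hcond : ¬ (PySem.Str.isIn (String.ofList [ch]) s2 = true) :=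
        fun hc => hch ((isin_single ch s2).mp hc)
      rw [if_neg hcond]
      have hcongr : (PySem.Set.ofList (M.map (fun m => hgApply m s2))).foldl
            (fun nv v =>
              if PySem.Str.isIn (String.ofList [ch]) v then
                reps.foldl (fun nv r =>
                    PySem.Set.add nv
                      (PySem.Str.replace v (String.ofList [ch]) (String.ofList [r]))) nv
              else nv)
            PySem.Set.empty
          = (PySem.Set.ofList (M.map (fun m => hgApply m s2))).foldl
              (fun nv _ => nv) PySem.Set.empty := by
        apply PySem.List.foldl_congr_mem
        intro acc v hv
        obtain ⟨m, hm, rfl⟩ := List.mem_map.mp ((PySem.Set.mem_ofList _ _).mp hv)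
        have hnin : ch ∉ (hgApply m s2).toList := by
          simp only [hgApply, String.toList_ofList]
          exact fun hc => hch ((mem_apply procd m (hM m hm) ch hchp hKch s2.toList).mp hc)
        rw [if_neg (fun hc => hnin ((isin_single ch (hgApply m s2)).mp hc))]
      rw [hcongr, PySem.List.foldl_ignore]
      have hid : PySem.Set.union (PySem.Set.ofList (M.map (fun m => hgApply m s2)))
          PySem.Set.empty = PySem.Set.ofList (M.map (fun m => hgApply m s2)) :=
        PySem.Set.update_nil _
      rw [hid]
      exact ih procd M (fun q hq => hdisj q (List.mem_cons_of_mem _ hq))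
        (fun q hq => hGV q (List.mem_cons_of_mem _ hq))
        (fun q hq => hKmem q (List.mem_cons_of_mem _ hq))
        hndtail.2 hM

-- ===== VERDICT (by name: the statement is the Claim_ definition above) =====
set_option maxRecDepth 8000 in
theorem normalize_variants_py_spec : Claim_equal_normalize_variants_py := by
  intro s _
  unfold Spec_normalize_variants_py normalize_variants_py normalize_variants_py_alt
  dsimp only
  have h := phase1 (PySem.Str.replace (PySem.Str.replace (PySem.Str.lower s) "rn" "m") "vv" "w")
      hgExpand [] [PySem.Dict.empty]
      (by intro p _; simp)
      (by intro p hp; fin_cases hp <;> simp [hgExpand])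
      (by intro p hp; fin_cases hp <;> simp [hgExpand])
      (by simp [hgExpand])
      (by intro m hm k v hkv
          simp only [List.mem_singleton] at hm
          subst hm
          simp [PySem.Dict.get?_empty] at hkv)
  simp only [List.map_cons, List.map_nil, hgApply_empty] at h
  rw [h]
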